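-- pv_equiv track=rewrite | github.com/eliottcassidy2000/math | 04-computation/alpha4_binary_phase_proof.py | compute_alpha
-- ===== SOURCE A (Python) =====
-- def compute_alpha(groups):
--     """Compute alpha_1 (= beta_1) and alpha_2 (= beta_2)."""
--     vs_list = list(groups.items())
--     n_vs = len(vs_list)
--
--     # alpha_1 = sum of all d(S) = total directed cycles
--     # Actually: alpha_1 = number of cycle vertex sets (with multiplicity)
--     # Wait - need to clarify. In the beta formulation:
--     # beta_1 = sum over vertex sets S of d(S), where d(S) = #directed cycles on S
--     # beta_2 = sum over disjoint pairs (S,S') of d(S)*d(S')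
--
--     alpha1 = sum(d for _, d in vs_list)
--
--     alpha2 = 0
--     for i in range(n_vs):
--         for j in range(i+1, n_vs):
--             if not (vs_list[i][0] & vs_list[j][0]):  # disjoint
--                 alpha2 += vs_list[i][1] * vs_list[j][1]
--
--     return alpha1, alpha2
-- ===== SOURCE B (Python) =====
-- def compute_alpha(groups):
--     """Compute alpha_1 (= beta_1) and alpha_2 (= beta_2).
--
--     alpha2 via the symmetric full-matrix identity:
--     2*alpha2 = (sum over ALL ordered pairs (p,q) with disjoint keys of d_p*d_q)
--                - (diagonal terms, i.e. keys equal to 0)."""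
--     items = list(groups.items())
--     alpha1 = sum(d for _, d in items)
--     total = sum(d * sum(e for k2, e in items if k & k2 == 0) for k, d in items)
--     diag = sum(d * d for k, d in items if k == 0)
--     return alpha1, (total - diag) // 2
-- ===== Notes on version B (the rewrite author's own statement) =====
-- stated objective: alternative
-- what changed: A sums d_i*d_j over the ordered triangle i<j with nested index loops; B instead computes, per item, its product with the disjoint-key sum over the WHOLE list, then recovers alpha2 from the symmetric identity 2*alpha2 = full-matrix sum minus the zero-key diagonal.
import Mathlib
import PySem

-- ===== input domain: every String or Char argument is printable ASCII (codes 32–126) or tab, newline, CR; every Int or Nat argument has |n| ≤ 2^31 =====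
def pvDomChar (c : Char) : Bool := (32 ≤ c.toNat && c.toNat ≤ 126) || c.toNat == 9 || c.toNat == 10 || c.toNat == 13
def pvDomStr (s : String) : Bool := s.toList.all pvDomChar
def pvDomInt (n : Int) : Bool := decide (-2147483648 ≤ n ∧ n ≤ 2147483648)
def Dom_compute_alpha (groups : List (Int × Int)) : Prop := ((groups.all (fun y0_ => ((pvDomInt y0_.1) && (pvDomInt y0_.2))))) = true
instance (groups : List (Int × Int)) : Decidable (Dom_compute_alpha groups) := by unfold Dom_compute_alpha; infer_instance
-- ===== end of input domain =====

-- B replaces A's triangular index loops by the symmetric full-matrix identity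
-- 2*alpha2 = (sum of d_p*d_q over all ordered disjoint-key pairs) - (zero-key diagonal); alternative decomposition, same asymptotic cost.


-- ===== PORT A =====
-- inner loop: for j in range(i+1, n): if not (vs_list[i][0] & vs_list[j][0]): alpha2 += vs_list[i][1]*vs_list[j][1]
-- (the triangle over indices i < j is transcribed structurally: head x paired with every later element, then recurse)
def pvAlphaInner (x : Int × Int) : List (Int × Int) → Int → Int
  | [], acc => acc
  | y :: r, acc => pvAlphaInner x r (if PySem.Int.band x.1 y.1 = 0 then acc + x.2 * y.2 else acc)

-- outer loop: for i in range(n): …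
def pvAlphaTri : List (Int × Int) → Int → Int
  | [], acc => acc
  | x :: r, acc => pvAlphaTri r (pvAlphaInner x r acc)

def compute_alpha (groups : List (Int × Int)) : Int × Int :=
  let vs_list := groups
  let alpha1 := (vs_list.map (fun p => p.2)).sum
  let alpha2 := pvAlphaTri vs_list 0
  (alpha1, alpha2)

-- ===== PORT B =====
def compute_alpha_alt (groups : List (Int × Int)) : Int × Int :=
  let alpha1 := (groups.map (fun p => p.2)).sum
  let total := (groups.map (fun p =>
      p.2 * ((groups.filter (fun q => PySem.Int.band p.1 q.1 == 0)).map (fun q => q.2)).sum)).sum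
  let diag := ((groups.filter (fun p => p.1 == 0)).map (fun p => p.2 * p.2)).sum
  (alpha1, PySem.Int.floordiv (total - diag) 2)

-- ===== PRECONDITION & SPEC =====
def Spec_compute_alpha (groups : List (Int × Int)) (out : Int × Int) : Prop := out = compute_alpha_alt groups
instance (groups : List (Int × Int)) (out : Int × Int) : Decidable (Spec_compute_alpha groups out) := by unfold Spec_compute_alpha; infer_instance

-- ===== CLAIM (what is proved, stated in full; the proofs are below) =====
def Claim_equal_compute_alpha : Prop := ∀ (groups : List (Int × Int)), Dom_compute_alpha groups → Spec_compute_alpha groups (compute_alpha groups)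

-- ===== LEMMAS AND PROOFS =====

-- S x l: x's contribution against every later element (what one inner pass adds)
def pvS (x : Int × Int) (l : List (Int × Int)) : Int :=
  ((l.filter (fun q => PySem.Int.band x.1 q.1 == 0)).map (fun y => x.2 * y.2)).sum

-- T l: the whole triangle sum
def pvT : List (Int × Int) → Int
  | [] => 0
  | x :: r => pvS x r + pvT r

theorem pvAlphaInner_eq (x : Int × Int) (l : List (Int × Int)) (acc : Int) :
    pvAlphaInner x l acc = acc + pvS x l := by
  induction l generalizing acc with
  | nil => simp [pvAlphaInner, pvS]
  | cons y r ih =>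
    simp only [pvAlphaInner, pvS, List.filter_cons]
    by_cases h : PySem.Int.band x.1 y.1 = 0 <;>
      simp [h, ih, pvS] <;> ring

theorem pvAlphaTri_eq (l : List (Int × Int)) (acc : Int) :
    pvAlphaTri l acc = acc + pvT l := by
  induction l generalizing acc with
  | nil => simp [pvAlphaTri, pvT]
  | cons x r ih => simp [pvAlphaTri, pvT, ih, pvAlphaInner_eq]; ring

def pvTotal (full : List (Int × Int)) (l : List (Int × Int)) : Int :=
  (l.map (fun p =>
      p.2 * ((full.filter (fun q => PySem.Int.band p.1 q.1 == 0)).map (fun q => q.2)).sum)).sum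

def pvDiag (l : List (Int × Int)) : Int :=
  ((l.filter (fun p => p.1 == 0)).map (fun p => p.2 * p.2)).sum

theorem pvS_eq_mul (x : Int × Int) (l : List (Int × Int)) :
    pvS x l = x.2 * ((l.filter (fun q => PySem.Int.band x.1 q.1 == 0)).map (fun q => q.2)).sum := by
  induction l with
  | nil => simp [pvS]
  | cons y r ih =>
    simp only [pvS, List.filter_cons] at *
    by_cases h : PySem.Int.band x.1 y.1 = 0 <;> simp [h, ih] <;> ring

-- one head-step of the full-matrix sum, restricted to the tail rows: filtering against x :: r
theorem pvTotal_cons_full (x : Int × Int) (r l : List (Int × Int)) :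
    pvTotal (x :: r) l = pvTotal r l + pvS x l := by
  induction l with
  | nil => simp [pvTotal, pvS]
  | cons y t ih =>
    simp only [pvTotal, List.map_cons, List.sum_cons, List.filter_cons] at *
    have hc : PySem.Int.band y.1 x.1 = PySem.Int.band x.1 y.1 := PySem.Int.band_comm _ _
    by_cases h : PySem.Int.band x.1 y.1 = 0 <;>
      simp only [pvS, List.filter_cons, hc, h, if_pos, beq_iff_eq,
        List.map_cons, List.sum_cons] <;>
      simp [h, pvS] at * <;> linarith [ih]

theorem two_mul_pvT (l : List (Int × Int)) :
    pvTotal l l - pvDiag l = 2 * pvT l := by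
  induction l with
  | nil => simp [pvTotal, pvDiag, pvT]
  | cons x r ih =>
    have hfull := pvTotal_cons_full x r r
    have hx : pvS x (x :: r) = (if x.1 = 0 then x.2 * x.2 else 0) + pvS x r := by
      simp only [pvS, List.filter_cons]
      by_cases h : x.1 = 0 <;>
        simp [h, PySem.Int.band_self]
    simp only [pvTotal, List.map_cons, List.sum_cons] at *
    have hx' : x.2 * ((List.filter (fun q => PySem.Int.band x.1 q.1 == 0) (x :: r)).map (fun q => q.2)).sum
        = pvS x (x :: r) := (pvS_eq_mul x (x :: r)).symm
    have hdiag : pvDiag (x :: r) = (if x.1 = 0 then x.2 * x.2 else 0) + pvDiag r := by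
      simp only [pvDiag, List.filter_cons]
      by_cases h : x.1 = 0 <;> simp [h]
    simp only [pvT]
    -- pvTotal (x::r) over rows (x::r) = pvS x (x::r) + pvTotal (x::r) r
    --                                 = pvS x (x::r) + pvTotal r r + pvS x r
    have : pvTotal (x :: r) r = pvTotal r r + pvS x r := pvTotal_cons_full x r r
    rw [hx', hdiag, hx] at *
    omega

theorem compute_alpha_eq (groups : List (Int × Int)) :
    compute_alpha groups = compute_alpha_alt groups := by
  simp only [compute_alpha, compute_alpha_alt]
  refine Prod.ext rfl ?_
  show pvAlphaTri groups 0 = PySem.Int.floordiv (pvTotal groups groups - pvDiag groups) 2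
  rw [pvAlphaTri_eq, two_mul_pvT, PySem.Int.floordiv_eq_ediv_of_pos (by omega)]
  omega

-- ===== VERDICT (by name: the statement is the Claim_ definition above) =====
theorem compute_alpha_spec : Claim_equal_compute_alpha := by
  intro groups _
  unfold Spec_compute_alpha
  exact compute_alpha_eq groups
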